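-- pv_equiv track=rewrite | github.com/DarriEy/MARTy | MARTy.py | _find_matching_parameter
-- ===== SOURCE A (Python) =====
-- from typing import TYPE_CHECKING, Optional
--
-- def _find_matching_parameter(user_input: str, config: dict) -> Optional[str]:
--     """Find the closest matching parameter name"""
--     user_input = user_input.lower()
--
--     # Direct match
--     for param in config:
--         if user_input == param.lower():
--             return param
--
--     # Partial match
--     for param in config:
--         if user_input in param.lower():
--             return param
--
--     return None
-- ===== SOURCE B (Python) =====
-- from typing import Optional
--
-- def _find_matching_parameter(user_input: str, config: dict) -> Optional[str]:
--     """Single pass: return on exact match; remember the first partial match."""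
--     user_input = user_input.lower()
--     best_partial = None
--     for param in config:
--         p = param.lower()
--         if user_input == p:
--             return param
--         if best_partial is None and user_input in p:
--             best_partial = param
--     return best_partial
-- ===== Notes on version B (the rewrite author's own statement) =====
-- stated objective: alternative
-- what changed: Replaces A's two full scans (exact pass, then partial pass) with one pass that returns immediately on an exact match and carries the first partial candidate in an accumulator.
import Mathlib
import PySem

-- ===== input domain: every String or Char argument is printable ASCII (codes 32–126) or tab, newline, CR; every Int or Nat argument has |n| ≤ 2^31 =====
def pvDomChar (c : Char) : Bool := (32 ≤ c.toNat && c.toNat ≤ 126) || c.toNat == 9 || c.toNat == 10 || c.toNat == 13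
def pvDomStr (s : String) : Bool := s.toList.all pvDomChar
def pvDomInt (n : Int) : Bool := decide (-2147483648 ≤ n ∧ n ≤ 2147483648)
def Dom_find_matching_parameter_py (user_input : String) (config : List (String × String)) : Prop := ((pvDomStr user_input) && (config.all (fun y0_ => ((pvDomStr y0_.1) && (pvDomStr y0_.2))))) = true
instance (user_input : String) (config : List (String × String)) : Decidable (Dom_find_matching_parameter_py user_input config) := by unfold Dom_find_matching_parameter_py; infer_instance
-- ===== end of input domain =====

-- ===== PORT A =====
-- direct-match pass: first key whose lowercase equals u
def fmpA_exact (u : String) : List (String × String) → Option String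
  | [] => none
  | (k, _) :: rest => if u == PySem.Str.lower k then some k else fmpA_exact u rest

-- partial-match pass: first key whose lowercase contains u
def fmpA_partial (u : String) : List (String × String) → Option String
  | [] => none
  | (k, _) :: rest => if PySem.Str.isIn u (PySem.Str.lower k) then some k else fmpA_partial u rest

def find_matching_parameter_py (user_input : String) (config : List (String × String)) : Option String :=
  let u := PySem.Str.lower user_input
  match fmpA_exact u config with
  | some p => some p
  | none => fmpA_partial u config

-- ===== PORT B =====
-- B: one loop; immediate return on exact, accumulator holds the first partial match
def fmpB_loop (u : String) (best : Option String) : List (String × String) → Option String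
  | [] => best
  | (k, _) :: rest =>
    let p := PySem.Str.lower k
    if u == p then some k
    else fmpB_loop u (if best.isNone && PySem.Str.isIn u p then some k else best) rest

def find_matching_parameter_py_alt (user_input : String) (config : List (String × String)) : Option String :=
  fmpB_loop (PySem.Str.lower user_input) none config

-- ===== PRECONDITION & SPEC =====
def Spec_find_matching_parameter_py (user_input : String) (config : List (String × String)) (out : Option String) : Prop := out = find_matching_parameter_py_alt user_input config
instance (user_input : String) (config : List (String × String)) (out : Option String) : Decidable (Spec_find_matching_parameter_py user_input config out) := by unfold Spec_find_matching_parameter_py; infer_instance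

-- ===== CLAIM (what is proved, stated in full; the proofs are below) =====
def Claim_equal_find_matching_parameter_py : Prop := ∀ (user_input : String) (config : List (String × String)), Dom_find_matching_parameter_py user_input config → Spec_find_matching_parameter_py user_input config (find_matching_parameter_py user_input config)

-- ===== LEMMAS AND PROOFS =====

theorem fmpB_loop_eq (u : String) (l : List (String × String)) : ∀ best : Option String,
    fmpB_loop u best l =
      (match fmpA_exact u l with
       | some p => some p
       | none => match best with
                 | some b => some b
                 | none => fmpA_partial u l) := by
  induction l with
  | nil => intro best; cases best <;> rfl
  | cons hd tl ih =>
    intro best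
    obtain ⟨k, v⟩ := hd
    simp only [fmpB_loop, fmpA_exact, fmpA_partial]
    by_cases he : u == PySem.Str.lower k
    · simp [he]
    · simp only [he]
      rw [ih]
      cases best with
      | some b => simp
      | none =>
        by_cases hp : PySem.Str.isIn u (PySem.Str.lower k) <;>
          simp only [hp, Bool.true_and, Bool.false_and, Option.isNone_none, if_true, if_false] <;>
          cases fmpA_exact u tl <;> simp

-- ===== VERDICT (by name: the statement is the Claim_ definition above) =====
theorem find_matching_parameter_py_spec : Claim_equal_find_matching_parameter_py := by
  intro user_input config _
  unfold Spec_find_matching_parameter_py find_matching_parameter_py find_matching_parameter_py_alt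
  rw [fmpB_loop_eq]
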